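-- pv_equiv track=rewrite | github.com/thein3000/letter_replacement | general.py | replace_letter_by_positions
-- ===== SOURCE A (Python) =====
-- def replace_letter_by_positions(text, letter_to_replace, replacement_letter, positions):
--     """
--     Replaces a character in a given set of word positions keeping current case.
--
--     :param text: Original string.
--     :param letter_to_replace: Letter that is going to be replaced.
--     :param replacement_letter: Letter that will be inserted.
--     :param positions: Iterable containing positions as "nth() instance of letter to replace".
--     :return: String with letters replaced.
--     """
--     modified_text = text
--     working_position = 0
--
--     for i, char in enumerate(text):
--         if char == letter_to_replace.upper() or char == letter_to_replace.lower():
--             working_position += 1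
--             if working_position in positions:
--                 is_upper_case = char.isupper()
--                 if is_upper_case:
--                     modified_text = replace_char_by_index(modified_text, i, replacement_letter.upper())
--                 else:
--                     modified_text = replace_char_by_index(modified_text, i, replacement_letter.lower())
--     return modified_text
--
-- def replace_char_by_index(text, index, replacement_letter):
--     """ Replaces a character in a string by its index. """
--     return text[:index] + replacement_letter + text[index+1:]
-- ===== SOURCE B (Python) =====
-- def replace_letter_by_positions(text, letter_to_replace, replacement_letter, positions):
--     """Index-table decomposition: collect matching indices, select targets, rebuild once."""
--     up = letter_to_replace.upper()
--     low = letter_to_replace.lower()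
--     occ = [i for i, c in enumerate(text) if c == up or c == low]
--     targets = [idx for n, idx in enumerate(occ, 1) if n in positions]
--     repl_up = replacement_letter.upper()
--     repl_low = replacement_letter.lower()
--     return ''.join(
--         (repl_up if c.isupper() else repl_low) if i in targets else c
--         for i, c in enumerate(text)
--     )
-- ===== Notes on version B (the rewrite author's own statement) =====
-- stated objective: faster
-- what changed: A interleaves one scan with repeated O(n) slice-splicing of the working string; B first builds the list of matching text indices, selects the target indices by occurrence number, and rebuilds the whole string in a single join pass.
-- outside the precondition, e.g. on replace_letter_by_positions('aa', 'a', 'xy', [1, 2]): A returns 'xxya', B returns 'xyxy'; on replace_letter_by_positions('aba', 'a', '', [1, 2]): A returns 'ba', B returns 'b'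
import Mathlib
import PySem

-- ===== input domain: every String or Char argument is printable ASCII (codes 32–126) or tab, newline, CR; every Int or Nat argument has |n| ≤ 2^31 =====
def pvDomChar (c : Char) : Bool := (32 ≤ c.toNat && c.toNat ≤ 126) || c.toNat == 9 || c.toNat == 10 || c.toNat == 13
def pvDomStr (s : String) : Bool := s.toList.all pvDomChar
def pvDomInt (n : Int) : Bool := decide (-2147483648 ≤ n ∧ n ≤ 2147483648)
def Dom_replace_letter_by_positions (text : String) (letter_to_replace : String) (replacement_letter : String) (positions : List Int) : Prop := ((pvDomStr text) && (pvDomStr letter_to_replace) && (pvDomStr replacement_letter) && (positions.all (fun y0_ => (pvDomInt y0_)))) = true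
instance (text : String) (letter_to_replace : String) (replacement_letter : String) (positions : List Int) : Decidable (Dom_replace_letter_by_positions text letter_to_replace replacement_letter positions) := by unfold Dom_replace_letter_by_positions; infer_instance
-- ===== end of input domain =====

-- B replaces A's interleaved scan + per-replacement slice-splicing by an index-table decomposition
-- (collect matching indices, select targets by occurrence number, rebuild the string in one pass);
-- objective: faster (no O(n) splice per replaced occurrence; measured).
-- Equality is proved on Pre_ (replacement strings of a single character).

-- ===== PORT A =====
-- helper `replace_char_by_index`: text[:index] + replacement_letter + text[index+1:]
def pvReplaceCharByIndex (t : List Char) (i : Int) (r : List Char) : List Char :=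
  PySem.List.slice t none (some i) ++ r ++ PySem.List.slice t (some (i + 1)) none

def replace_letter_by_positions (text : String) (letter_to_replace : String) (replacement_letter : String) (positions : List Int) : String :=
  let up := PySem.Chars.upper letter_to_replace.toList
  let low := PySem.Chars.lower letter_to_replace.toList
  let st := (PySem.List.enumerate text.toList 0).foldl
    (fun (st : List Char × Int) p =>
      if [p.2] == up || [p.2] == low then
        let wp := st.2 + 1
        if positions.contains wp then
          let r := if PySem.Chars.isupper p.2 then PySem.Chars.upper replacement_letter.toList
                   else PySem.Chars.lower replacement_letter.toList
          (pvReplaceCharByIndex st.1 p.1 r, wp)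
        else (st.1, wp)
      else st)
    (text.toList, 0)
  String.mk st.1

-- ===== PORT B =====
def replace_letter_by_positions_alt (text : String) (letter_to_replace : String) (replacement_letter : String) (positions : List Int) : String :=
  let up := PySem.Chars.upper letter_to_replace.toList
  let low := PySem.Chars.lower letter_to_replace.toList
  let occ := (PySem.List.enumerate text.toList 0).filterMap
    (fun p => if [p.2] == up || [p.2] == low then some p.1 else none)
  let targets := (PySem.List.enumerate occ 1).filterMap
    (fun q => if positions.contains q.1 then some q.2 else none)
  let rup := PySem.Chars.upper replacement_letter.toList
  let rlow := PySem.Chars.lower replacement_letter.toList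
  String.mk ((PySem.List.enumerate text.toList 0).flatMap
    (fun p => if targets.contains p.1 then (if PySem.Chars.isupper p.2 then rup else rlow) else [p.2]))

-- ===== PRECONDITION & SPEC =====
-- Pre_ restricts replacement_letter to a single character whenever some occurrence is actually
-- replaced — the function's documented domain ("Letter that will be inserted"); for longer or
-- empty replacement strings A's fixed-index splicing operates on a length-shifted string.
def Pre_replace_letter_by_positions (text : String) (letter_to_replace : String) (replacement_letter : String) (positions : List Int) : Prop :=
  replacement_letter.toList.length = 1 ∨
    (∀ p ∈ positions, ¬ (1 ≤ p ∧ p ≤ ((text.toList.filter (fun c =>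
      [c] == PySem.Chars.upper letter_to_replace.toList ||
      [c] == PySem.Chars.lower letter_to_replace.toList)).length : Int)))
instance (text : String) (letter_to_replace : String) (replacement_letter : String) (positions : List Int) : Decidable (Pre_replace_letter_by_positions text letter_to_replace replacement_letter positions) := by unfold Pre_replace_letter_by_positions; infer_instance

def pvWitness_replace_letter_by_positions : String × String × String × List Int := ("Banana band", "a", "o", [2, 3])

def Spec_replace_letter_by_positions (text : String) (letter_to_replace : String) (replacement_letter : String) (positions : List Int) (out : String) : Prop := out = replace_letter_by_positions_alt text letter_to_replace replacement_letter positions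
instance (text : String) (letter_to_replace : String) (replacement_letter : String) (positions : List Int) (out : String) : Decidable (Spec_replace_letter_by_positions text letter_to_replace replacement_letter positions out) := by unfold Spec_replace_letter_by_positions; infer_instance

-- ===== CLAIM (what is proved, stated in full; the proofs are below) =====
def Claim_equal_replace_letter_by_positions : Prop := ∀ (text : String) (letter_to_replace : String) (replacement_letter : String) (positions : List Int), Dom_replace_letter_by_positions text letter_to_replace replacement_letter positions → Pre_replace_letter_by_positions text letter_to_replace replacement_letter positions → Spec_replace_letter_by_positions text letter_to_replace replacement_letter positions (replace_letter_by_positions text letter_to_replace replacement_letter positions)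

-- ===== LEMMAS AND PROOFS =====

-- reference: one left-to-right pass emitting, per char, either the case-matched replacement
-- (when the running occurrence number is in `positions`) or the char itself
def pvRef (positions : List Int) (m : Char → Bool) (ru rl : List Char) : List Char → Int → List Char
  | [], _ => []
  | c :: cs, wp =>
    if m c then
      (if positions.contains (wp + 1) then (if PySem.Chars.isupper c then ru else rl) else [c])
        ++ pvRef positions m ru rl cs (wp + 1)
    else c :: pvRef positions m ru rl cs wp

-- the index table of B (occ) and the selected targets, as functions of the remaining suffix
def pvOcc (up low : List Char) (cs : List Char) (k : Int) : List Int :=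
  (PySem.List.enumerate cs k).filterMap (fun p => if [p.2] == up || [p.2] == low then some p.1 else none)

def pvTg (positions : List Int) (l : List Int) (n : Int) : List Int :=
  (PySem.List.enumerate l n).filterMap (fun q => if positions.contains q.1 then some q.2 else none)

theorem pvOcc_cons (up low : List Char) (c : Char) (cs : List Char) (k : Int) :
    pvOcc up low (c :: cs) k
      = (if [c] == up || [c] == low then [k] else []) ++ pvOcc up low cs (k + 1) := by
  rw [pvOcc, PySem.List.enumerate_cons, List.filterMap_cons]
  by_cases hm : ([c] == up || [c] == low) = true
  · rw [if_pos hm, if_pos hm]; rfl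
  · rw [if_neg hm, if_neg hm]; rfl

theorem pvTg_cons (positions : List Int) (x : Int) (l : List Int) (n : Int) :
    pvTg positions (x :: l) n
      = (if positions.contains n then [x] else []) ++ pvTg positions l (n + 1) := by
  rw [pvTg, PySem.List.enumerate_cons, List.filterMap_cons]
  by_cases hp : positions.contains n = true
  · rw [if_pos hp, if_pos hp]; rfl
  · rw [if_neg hp, if_neg hp]; rfl

theorem pvOcc_ge (up low : List Char) : ∀ (cs : List Char) (k i : Int),
    i ∈ pvOcc up low cs k → k ≤ i := by
  intro cs
  induction cs with
  | nil => intro k i hi; simp [pvOcc] at hi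
  | cons c cs ih =>
    intro k i hi
    rw [pvOcc_cons] at hi
    rcases List.mem_append.mp hi with h | h
    · split at h <;> simp at h; omega
    · have := ih (k + 1) i h; omega

theorem pvTg_subset (positions : List Int) : ∀ (l : List Int) (n i : Int),
    i ∈ pvTg positions l n → i ∈ l := by
  intro l
  induction l with
  | nil => intro n i hi; simp [pvTg] at hi
  | cons x l ih =>
    intro n i hi
    rw [pvTg_cons] at hi
    rcases List.mem_append.mp hi with h | h
    · split at h <;> simp at h; simp [h]
    · exact List.mem_cons_of_mem _ (ih (n + 1) i h)

-- B's one-pass rebuild equals the reference pass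
theorem pvB_main (positions : List Int) (up low ru rl : List Char) :
    ∀ (cs : List Char) (k wp : Int) (T : List Int),
    (∀ i : Int, k ≤ i → T.contains i = (pvTg positions (pvOcc up low cs k) (wp + 1)).contains i) →
    (PySem.List.enumerate cs k).flatMap
      (fun p => if T.contains p.1 then (if PySem.Chars.isupper p.2 then ru else rl) else [p.2])
    = pvRef positions (fun c => [c] == up || [c] == low) ru rl cs wp := by
  intro cs
  induction cs with
  | nil => intro k wp T h; simp [pvRef]
  | cons c cs ih =>
    intro k wp T h
    rw [PySem.List.enumerate_cons, List.flatMap_cons]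
    have hk := h k le_rfl
    rw [pvOcc_cons] at hk
    have hnot : ∀ (n' : Int), (pvTg positions (pvOcc up low cs (k + 1)) n').contains k = false := by
      intro n'
      by_contra hcon
      have hkmem : k ∈ pvTg positions (pvOcc up low cs (k + 1)) n' :=
        List.contains_iff_mem.mp (Bool.of_not_eq_false hcon)
      have := pvOcc_ge up low cs (k + 1) k (pvTg_subset positions _ n' k hkmem)
      omega
    by_cases hm : ([c] == up || [c] == low) = true
    · rw [if_pos hm, List.singleton_append, pvTg_cons] at hk
      by_cases hp : positions.contains (wp + 1) = true
      · rw [if_pos hp, List.singleton_append, List.contains_cons] at hk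
        have hkk : (k == k) = true := by simp
        rw [hkk, Bool.true_or] at hk
        have hrec := ih (k + 1) (wp + 1) T (fun i hi => by
          have hT := h i (by omega)
          rw [pvOcc_cons, if_pos hm, List.singleton_append, pvTg_cons, if_pos hp,
            List.singleton_append, List.contains_cons] at hT
          have hik : (i == k) = false := by simp; omega
          rw [hik, Bool.false_or] at hT
          exact hT)
        simp only [pvRef]
        rw [if_pos hm, if_pos hp, hrec, hk]
        simp
      · have hpf : positions.contains (wp + 1) = false := Bool.eq_false_iff.mpr hp
        rw [if_neg hp, List.nil_append, hnot] at hk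
        have hrec := ih (k + 1) (wp + 1) T (fun i hi => by
          have hT := h i (by omega)
          rw [pvOcc_cons, if_pos hm, List.singleton_append, pvTg_cons, if_neg hp,
            List.nil_append] at hT
          exact hT)
        simp only [pvRef]
        rw [if_pos hm, if_neg hp, hrec, hk]
        simp
    · rw [if_neg hm, List.nil_append, hnot] at hk
      have hrec := ih (k + 1) wp T (fun i hi => by
        have hT := h i (by omega)
        rw [pvOcc_cons, if_neg hm, List.nil_append] at hT
        exact hT)
      simp only [pvRef]
      rw [if_neg hm, hrec, hk]
      simp

-- splicing at the index just past `acc` replaces the head of the suffix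
theorem pv_splice (acc : List Char) (c : Char) (cs : List Char) (r : List Char) :
    pvReplaceCharByIndex (acc ++ c :: cs) (acc.length : Int) r = acc ++ r ++ cs := by
  have h1 : PySem.List.slice (acc ++ c :: cs) none (some (acc.length : Int)) = acc := by
    rw [PySem.List.slice_to_natCast, List.take_left]
  have h2 : PySem.List.slice (acc ++ c :: cs) (some ((acc.length : Int) + 1)) none = cs := by
    have hc : ((acc.length : Int) + 1) = ((acc.length + 1 : Nat) : Int) := by push_cast; ring
    rw [hc, PySem.List.slice_from_natCast, ← List.drop_drop, List.drop_left]
    rfl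
  rw [pvReplaceCharByIndex, h1, h2, List.append_assoc]

-- A's splice loop equals the reference pass, provided every replacement that fires inserts one char
theorem pvA_main (positions : List Int) (up low ru rl : List Char) :
    ∀ (cs acc : List Char) (wp : Int),
    (∀ n : Int, wp < n →
        n ≤ wp + ((cs.filter (fun c => [c] == up || [c] == low)).length : Int) →
        positions.contains n = true → ru.length = 1 ∧ rl.length = 1) →
    (PySem.List.enumerate cs (acc.length : Int)).foldl
      (fun (st : List Char × Int) p =>
        if [p.2] == up || [p.2] == low then
          let wp := st.2 + 1
          if positions.contains wp then
            let r := if PySem.Chars.isupper p.2 then ru else rl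
            (pvReplaceCharByIndex st.1 p.1 r, wp)
          else (st.1, wp)
        else st)
      (acc ++ cs, wp)
    = (acc ++ pvRef positions (fun c => [c] == up || [c] == low) ru rl cs wp,
       wp + ((cs.filter (fun c => [c] == up || [c] == low)).length : Int)) := by
  intro cs
  induction cs with
  | nil => intro acc wp h; simp [pvRef]
  | cons c cs ih =>
    intro acc wp h
    rw [PySem.List.enumerate_cons, List.foldl_cons]
    simp only [] at ih ⊢
    by_cases hm : ([c] == up || [c] == low) = true
    · have hcnt : ((c :: cs).filter (fun c => [c] == up || [c] == low)).length
          = (cs.filter (fun c => [c] == up || [c] == low)).length + 1 := by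
        simp [hm]
      by_cases hp : positions.contains (wp + 1) = true
      · have hlen := h (wp + 1) (by omega) (by rw [hcnt]; push_cast; omega) hp
        have hrlen : (if PySem.Chars.isupper c then ru else rl).length = 1 := by
          split
          · exact hlen.1
          · exact hlen.2
        rw [if_pos hm, if_pos hp, pv_splice]
        have hrec := ih (acc ++ (if PySem.Chars.isupper c then ru else rl)) (wp + 1)
          (fun n h1 h2 h3 => h n (by omega) (by rw [hcnt]; push_cast at h2 ⊢; omega) h3)
        rw [List.length_append, hrlen] at hrec
        have hcast : ((acc.length + 1 : Nat) : Int) = (acc.length : Int) + 1 := by push_cast; ring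
        rw [hcast] at hrec
        rw [hrec]
        simp only [pvRef]
        rw [if_pos hm, if_pos hp, hcnt, Prod.mk.injEq]
        constructor
        · rw [← List.append_assoc]
        · push_cast; ring
      · rw [if_pos hm, if_neg hp]
        have hrec := ih (acc ++ [c]) (wp + 1)
          (fun n h1 h2 h3 => h n (by omega) (by rw [hcnt]; push_cast at h2 ⊢; omega) h3)
        rw [List.length_append] at hrec
        have hcast : ((acc.length + [c].length : Nat) : Int) = (acc.length : Int) + 1 := by
          simp
        rw [hcast, List.append_assoc, List.singleton_append] at hrec
        rw [hrec]
        simp only [pvRef]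
        rw [if_pos hm, if_neg hp, hcnt, Prod.mk.injEq]
        constructor
        · rw [← List.append_assoc]
        · push_cast; ring
    · have hcnt : ((c :: cs).filter (fun c => [c] == up || [c] == low)).length
          = (cs.filter (fun c => [c] == up || [c] == low)).length := by
        simp [hm]
      rw [if_neg hm]
      have hrec := ih (acc ++ [c]) wp
        (fun n h1 h2 h3 => h n (by omega) (by rw [hcnt]; omega) h3)
      rw [List.length_append] at hrec
      have hcast : ((acc.length + [c].length : Nat) : Int) = (acc.length : Int) + 1 := by
        simp
      rw [hcast, List.append_assoc, List.singleton_append] at hrec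
      rw [hrec]
      simp only [pvRef]
      rw [if_neg hm, hcnt, Prod.mk.injEq]
      constructor
      · simp
      · rfl

-- ===== VERDICT (by name: the statement is the Claim_ definition above) =====
theorem replace_letter_by_positions_spec : Claim_equal_replace_letter_by_positions := by
  intro text ltr repl positions _ hpre
  unfold Spec_replace_letter_by_positions
  unfold replace_letter_by_positions replace_letter_by_positions_alt
  have hfire : ∀ n : Int, (0:Int) < n →
      n ≤ 0 + ((text.toList.filter (fun c =>
        [c] == PySem.Chars.upper ltr.toList || [c] == PySem.Chars.lower ltr.toList)).length : Int) →
      positions.contains n = true →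
      (PySem.Chars.upper repl.toList).length = 1 ∧ (PySem.Chars.lower repl.toList).length = 1 := by
    intro n h1 h2 h3
    rcases hpre with h | h
    · constructor <;> simp [PySem.Chars.upper, PySem.Chars.lower, h]
    · exact absurd ⟨by omega, by omega⟩ (h n (List.contains_iff_mem.mp h3))
  have hA := pvA_main positions (PySem.Chars.upper ltr.toList) (PySem.Chars.lower ltr.toList)
    (PySem.Chars.upper repl.toList) (PySem.Chars.lower repl.toList) text.toList [] 0 hfire
  simp only [List.length_nil, Nat.cast_zero, List.nil_append] at hA
  have hB := pvB_main positions (PySem.Chars.upper ltr.toList) (PySem.Chars.lower ltr.toList)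
    (PySem.Chars.upper repl.toList) (PySem.Chars.lower repl.toList) text.toList 0 0
    (pvTg positions
      (pvOcc (PySem.Chars.upper ltr.toList) (PySem.Chars.lower ltr.toList) text.toList 0) 1)
    (fun i _ => by norm_num)
  simp only [pvOcc, pvTg] at hB
  simp only [] at hA hB ⊢
  rw [hA]
  exact congrArg String.mk hB.symm
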